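-- pv_equiv track=rewrite | github.com/kirtivr/leetcode | Leetcode/rmq_tree.py | levelStartIndexes
-- ===== SOURCE A (Python) =====
-- def levelStartIndexes(N):
--     pow_2 = N
--     current = N
--     out = [0]
--     while pow_2 > 1:
--         out.append(current)
--         pow_2 = pow_2//2
--         current += pow_2
--     return out
-- ===== SOURCE B (Python) =====
-- def levelStartIndexes(N):
--     # Self-similar recursion: the table for N is [0] followed by the
--     # table for N//2 with every entry shifted up by N.
--     if N <= 1:
--         return [0]
--     return [0] + [N + x for x in levelStartIndexes(N // 2)]
-- ===== Notes on version B (the rewrite author's own statement) =====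
-- stated objective: alternative
-- what changed: B replaces A's iterative loop with running totals by a self-similar recursion: the table for N is [0] followed by the table for N//2 with every entry shifted by N, so no power/offset state is maintained at all.
import Mathlib
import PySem

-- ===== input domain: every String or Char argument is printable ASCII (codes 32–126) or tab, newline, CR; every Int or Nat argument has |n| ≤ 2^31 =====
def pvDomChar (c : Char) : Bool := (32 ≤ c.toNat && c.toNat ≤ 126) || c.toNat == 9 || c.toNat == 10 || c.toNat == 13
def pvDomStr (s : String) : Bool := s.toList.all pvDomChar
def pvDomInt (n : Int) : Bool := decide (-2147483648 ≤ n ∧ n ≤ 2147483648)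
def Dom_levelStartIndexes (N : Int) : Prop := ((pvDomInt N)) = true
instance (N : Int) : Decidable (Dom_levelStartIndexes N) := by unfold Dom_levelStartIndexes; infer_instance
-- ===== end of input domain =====

-- B replaces A's fused loop (running power + offset state) by a self-similar recursion:
-- the table for N is [0] followed by the table for N//2 shifted by N (alternative algorithm, same order of cost).


-- halving strictly decreases toNat while p > 1 (termination of both ports)
theorem pvHalfLt (p : Int) (h : p > 1) : (PySem.Int.floordiv p 2).toNat < p.toNat := by
  rw [PySem.Int.floordiv_eq_ediv_of_pos (by omega)]
  omega

-- ===== PORT A =====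
-- the while loop of A, state (pow_2, current, out)
def levelAux (pow2 current : Int) (out : List Int) : List Int :=
  if h : pow2 > 1 then
    levelAux (PySem.Int.floordiv pow2 2) (current + PySem.Int.floordiv pow2 2) (out ++ [current])
  else out
termination_by pow2.toNat
decreasing_by exact pvHalfLt pow2 h

def levelStartIndexes (N : Int) : List Int := levelAux N N [0]

-- ===== PORT B =====
-- self-similar recursion: table for N = 0 :: (table for N//2, each entry + N)
def levelStartIndexes_alt (N : Int) : List Int :=
  if h : N ≤ 1 then [0]
  else 0 :: (levelStartIndexes_alt (PySem.Int.floordiv N 2)).map (fun x => N + x)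
termination_by N.toNat
decreasing_by exact pvHalfLt N (by omega)

-- ===== PRECONDITION & SPEC =====
def Spec_levelStartIndexes (N : Int) (out : List Int) : Prop := out = levelStartIndexes_alt N
instance (N : Int) (out : List Int) : Decidable (Spec_levelStartIndexes N out) := by unfold Spec_levelStartIndexes; infer_instance

-- ===== CLAIM (what is proved, stated in full; the proofs are below) =====
def Claim_equal_levelStartIndexes : Prop := ∀ (N : Int), Dom_levelStartIndexes N → Spec_levelStartIndexes N (levelStartIndexes N)

-- ===== LEMMAS AND PROOFS =====

-- B's table always starts with 0
theorem alt_head (p : Int) : ∃ l, levelStartIndexes_alt p = 0 :: l := by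
  rw [levelStartIndexes_alt]
  split
  · exact ⟨[], rfl⟩
  · exact ⟨_, rfl⟩

-- unfolding of B's recursion in the p > 1 case
theorem alt_unfold (p : Int) (h : p > 1) :
    levelStartIndexes_alt p
      = 0 :: (levelStartIndexes_alt (PySem.Int.floordiv p 2)).map (fun x => p + x) := by
  rw [levelStartIndexes_alt, dif_neg (by omega)]

-- loop correspondence: A's fused loop equals out ++ the (shifted) B-table minus its leading 0,
-- where the shift c - p reconciles A's `current` with B's relative entries.
theorem levelAux_eq_alt (p c : Int) (out : List Int) :
    levelAux p c out = out ++ ((levelStartIndexes_alt p).map (fun x => (c - p) + x)).tail := by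
  by_cases h : p > 1
  · rw [levelAux, dif_pos h,
      levelAux_eq_alt (PySem.Int.floordiv p 2) (c + PySem.Int.floordiv p 2) (out ++ [c]),
      alt_unfold p h]
    obtain ⟨l, hl⟩ := alt_head (PySem.Int.floordiv p 2)
    rw [hl]
    simp [List.map_map]
  · rw [levelAux, dif_neg h, levelStartIndexes_alt, dif_pos (by omega)]
    simp
termination_by p.toNat
decreasing_by exact pvHalfLt p h

-- ===== VERDICT (by name: the statement is the Claim_ definition above) =====
theorem levelStartIndexes_spec : Claim_equal_levelStartIndexes := by
  intro N _
  unfold Spec_levelStartIndexes levelStartIndexes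
  rw [levelAux_eq_alt]
  obtain ⟨l, hl⟩ := alt_head N
  simp [hl]
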